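-- pv_equiv track=rewrite | github.com/longLiveData/Practice | python/20190701-SimpleFunctions/2/test.py | get
-- ===== SOURCE A (Python) =====
-- def get(n):
--     # 把小于n的平方数都放到squares中
--     squares = []
--     i = 1
--     while i ** 2 <= n:
--         squares.append(i)
--         i += 1
--
--     level = 0
--     queue = [n]
--     visited = [False] * (n+1)
--     while queue:
--         level += 1
--         temp = []
--         for q in queue:
--             for fa in squares:
--                 if q == fa:
--                     return level
--                 if q < fa:
--                     break
--                 if visited[q - fa]:
--                     continue
--                 temp.append(q-fa)
--                 visited[q-fa] = True
--             queue = temp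
--     return level
-- ===== SOURCE B (Python) =====
-- def get(n):
--     # Closed form: the BFS subtracts values 1..s (s = floor(sqrt(n))) per step,
--     # so the minimum number of steps to reach 0 is ceil(n / s); n == 0 needs 0 steps.
--     if n == 0:
--         return 0
--     s = 1
--     while (s + 1) * (s + 1) <= n:
--         s += 1
--     return -(-n // s)
-- ===== Notes on version B (the rewrite author's own statement) =====
-- stated objective: faster
-- what changed: Replaces A's breadth-first search over all values reachable by subtracting 1..floor(sqrt(n)) with the closed form ceil(n / floor(sqrt(n))), computing floor(sqrt(n)) by a simple O(sqrt(n)) increment loop.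
-- intended difference: For n = 0, A returns one (the BFS runs one vacuous level before the queue empties, leaving level = one), while B returns 0, the intended number of subtraction steps to go from 0 to 0. — e.g. on get(0): A returns 1, B returns 0
-- outside the precondition, e.g. on get(-5): A returns 1, B returns -5
import Mathlib
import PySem

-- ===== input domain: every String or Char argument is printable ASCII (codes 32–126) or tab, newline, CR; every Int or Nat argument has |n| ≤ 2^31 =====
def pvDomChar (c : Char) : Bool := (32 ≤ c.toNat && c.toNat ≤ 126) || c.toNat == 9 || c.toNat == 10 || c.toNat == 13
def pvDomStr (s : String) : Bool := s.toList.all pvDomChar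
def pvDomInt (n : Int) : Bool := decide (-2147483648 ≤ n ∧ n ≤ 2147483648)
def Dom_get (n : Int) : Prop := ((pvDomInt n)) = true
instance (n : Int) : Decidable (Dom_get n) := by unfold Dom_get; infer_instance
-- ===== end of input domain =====

-- B replaces A's breadth-first search by the closed form ceil(n / floor(sqrt n)) (objective: faster).

-- ===== PORT A =====
-- while i ** 2 <= n: squares.append(i); i += 1   (fuel bounds the iteration count; never reached)
def mkSquares (n : Int) (fuel : Nat) (i : Int) : List Int :=
  match fuel with
  | 0 => []
  | f + 1 => if i ^ 2 ≤ n then i :: mkSquares n f (i + 1) else []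

-- visited[i] = True  (hand port of list assignment; exact for in-range i, and all of A's writes are in range)
def pySetTrue : List Bool → Nat → List Bool
  | [], _ => []
  | _ :: xs, 0 => true :: xs
  | x :: xs, k + 1 => x :: pySetTrue xs k

-- the inner `for fa in squares` loop; `none` = the `return level` was hit, `some` = loop ended (or `break`)
def goFa (q : Int) (squares : List Int) (temp : List Int) (V : List Bool) :
    Option (List Int × List Bool) :=
  match squares with
  | [] => some (temp, V)
  | fa :: rest =>
    if q = fa then none
    else if q < fa then some (temp, V)
    else if V.getD (q - fa).toNat false then goFa q rest temp V
    else goFa q rest (temp ++ [q - fa]) (pySetTrue V (q - fa).toNat)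

-- the `for q in queue` loop (Python reassigns `queue = temp` inside the for body, but iteration is
-- over the original list, so it is equivalent to using the final temp as the next queue)
def goQ (squares : List Int) (qs : List Int) (temp : List Int) (V : List Bool) :
    Option (List Int × List Bool) :=
  match qs with
  | [] => some (temp, V)
  | q :: rest =>
    match goFa q squares temp V with
    | none => none
    | some (temp', V') => goQ squares rest temp' V'

-- the `while queue` loop (fuel n+2 exceeds the number of levels; the 0 case is never reached)
def bfs (squares : List Int) (fuel : Nat) (level : Int) (queue : List Int) (V : List Bool) : Int :=
  match fuel with
  | 0 => level
  | f + 1 =>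
    match queue with
    | [] => level
    | _ :: _ =>
      match goQ squares queue [] V with
      | none => level + 1
      | some (temp, V') => bfs squares f (level + 1) temp V'

def get (n : Int) : Int :=
  let squares := mkSquares n (n.toNat + 1) 1
  let visited := List.replicate (n + 1).toNat false
  bfs squares (n.toNat + 2) 0 [n] visited

-- ===== PORT B =====
-- while (s+1)*(s+1) <= n: s += 1   (fuel bounds the iteration count; never reached)
def isqrtLoop (n : Int) (fuel : Nat) (s : Int) : Int :=
  match fuel with
  | 0 => s
  | f + 1 => if (s + 1) * (s + 1) ≤ n then isqrtLoop n f (s + 1) else s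

def get_alt (n : Int) : Int :=
  if n = 0 then 0
  else -(PySem.Int.floordiv (-n) (isqrtLoop n (n.toNat + 1) 1))

-- ===== PRECONDITION & SPEC =====
-- Pre_ excludes negative n, which are outside the task's natural domain (a step count of a
-- nonnegative number); there A's value is a leftover of one vacuous BFS level over no squares.
def Pre_get (n : Int) : Prop := 0 ≤ n
instance (n : Int) : Decidable (Pre_get n) := by unfold Pre_get; infer_instance
def pvWitness_get : Int := 7

-- For n = 0, A returns one (the BFS runs one vacuous level before the queue empties, leaving
-- level = one), while B returns 0, the intended number of subtraction steps to go from 0 to 0.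
def D_get (n : Int) : Prop := n = 0
instance (n : Int) : Decidable (D_get n) := by unfold D_get; infer_instance

def Spec_get (n : Int) (out : Int) : Prop := ¬ D_get n → out = get_alt n
instance (n : Int) (out : Int) : Decidable (Spec_get n out) := by unfold Spec_get; infer_instance

def pvDiffWitness_get : Int := 0
def pvDiffWitnessOut_get : Int × Int := (1, 0)

-- ===== CLAIM (what is proved, stated in full; the proofs are below) =====
def Claim_unchanged_get : Prop := ∀ (n : Int), Dom_get n → Pre_get n → Spec_get n (get n)
def Claim_changed_get : Prop := Dom_get (pvDiffWitness_get) ∧ Pre_get (pvDiffWitness_get) ∧ D_get (pvDiffWitness_get) ∧ get (pvDiffWitness_get) = pvDiffWitnessOut_get.1 ∧ get_alt (pvDiffWitness_get) = pvDiffWitnessOut_get.2 ∧ pvDiffWitnessOut_get.1 ≠ pvDiffWitnessOut_get.2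
def Claim_exact_get : Prop := ∀ (n : Int), Dom_get n → Pre_get n → D_get n → get n ≠ get_alt n

-- ===== LEMMAS AND PROOFS =====

-- [i, i+1, ..., r]  (empty if r < i)
def ascRun (i r : Int) : List Int := (List.range (r + 1 - i).toNat).map (fun (j : Nat) => i + (j : Int))
-- [a, a-1, ..., b]  (empty if a < b)
def descRun (a b : Int) : List Int := (List.range (a + 1 - b).toNat).map (fun (j : Nat) => a - (j : Int))

-- visited has length n+1 and marks exactly the values c, c+1, ..., n-1
def VisInv (n c : Int) (V : List Bool) : Prop :=
  V.length = (n + 1).toNat ∧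
    ∀ x : Nat, V.getD x false = decide (c ≤ (x : Int) ∧ (x : Int) ≤ n - 1)

theorem ascRun_nil (i r : Int) (h : r < i) : ascRun i r = [] := by
  unfold ascRun
  have : (r + 1 - i).toNat = 0 := by omega
  simp [this]

theorem ascRun_cons (i r : Int) (h : i ≤ r) : ascRun i r = i :: ascRun (i + 1) r := by
  unfold ascRun
  apply List.ext_getElem
  · simp; omega
  · intro k h1 h2
    cases k with
    | zero => simp
    | succ m =>
      simp only [List.getElem_cons_succ, List.getElem_map, List.getElem_range]
      push_cast
      ring

theorem descRun_nil (a b : Int) (h : a < b) : descRun a b = [] := by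
  unfold descRun
  have : (a + 1 - b).toNat = 0 := by omega
  simp [this]

theorem descRun_cons (a b : Int) (h : b ≤ a) : descRun a b = a :: descRun (a - 1) b := by
  unfold descRun
  apply List.ext_getElem
  · simp; omega
  · intro k h1 h2
    cases k with
    | zero => simp
    | succ m =>
      simp only [List.getElem_cons_succ, List.getElem_map, List.getElem_range]
      push_cast
      ring

theorem pySetTrue_length (V : List Bool) (i : Nat) : (pySetTrue V i).length = V.length := by
  induction V generalizing i with
  | nil => rfl
  | cons x xs ih => cases i <;> simp [pySetTrue, ih]

theorem pySetTrue_getD_eq (V : List Bool) (i : Nat) (h : i < V.length) :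
    (pySetTrue V i).getD i false = true := by
  induction V generalizing i with
  | nil => simp at h
  | cons x xs ih =>
    cases i with
    | zero => rfl
    | succ k => simpa [pySetTrue] using ih k (by simpa using h)

theorem pySetTrue_getD_ne (V : List Bool) (i x : Nat) (h : x ≠ i) :
    (pySetTrue V i).getD x false = V.getD x false := by
  induction V generalizing i x with
  | nil => rfl
  | cons y ys ih =>
    cases i with
    | zero => cases x with
      | zero => omega
      | succ k => simp [pySetTrue]
    | succ j => cases x with
      | zero => simp [pySetTrue]
      | succ k => simpa [pySetTrue] using ih j k (by omega)

theorem visinv_mark (n c : Int) (V : List Bool) (hV : VisInv n c V)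
    (hc : c ≤ n) (hc0 : 0 < c) : VisInv n (c - 1) (pySetTrue V (c - 1).toNat) := by
  obtain ⟨hlen, hget⟩ := hV
  refine ⟨by rw [pySetTrue_length]; exact hlen, ?_⟩
  intro x
  by_cases hx : x = (c - 1).toNat
  · subst hx
    rw [pySetTrue_getD_eq V _ (by rw [hlen]; omega)]
    have : ((c - 1).toNat : Int) = c - 1 := by omega
    rw [this]
    symm
    rw [decide_eq_true_eq]
    omega
  · rw [pySetTrue_getD_ne V _ _ hx, hget x]
    have hxi : (x : Int) ≠ c - 1 := by omega
    congr 1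
    simp only [eq_iff_iff]
    constructor <;> intro h <;> omega

theorem visinv_init (n : Int) (hn : 0 ≤ n) :
    VisInv n n (List.replicate (n + 1).toNat false) := by
  refine ⟨by simp, ?_⟩
  intro x
  have h1 : (List.replicate (n + 1).toNat false).getD x false = false := by
    by_cases h : x < (n + 1).toNat
    · rw [List.getD_eq_getElem _ _ (by simpa using h)]
      simp
    · rw [List.getD_eq_default]
      simp
      omega
  rw [h1]
  symm
  rw [decide_eq_false_iff_not]
  omega

theorem visinv_read (n c : Int) (V : List Bool) (hV : VisInv n c V) (v : Int) (hv : 0 ≤ v) :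
    V.getD v.toNat false = decide (c ≤ v ∧ v ≤ n - 1) := by
  have h := hV.2 v.toNat
  have e : ((v.toNat : Nat) : Int) = v := by omega
  rw [e] at h
  exact h

theorem isqrt_spec (n : Int) : ∀ (fuel : Nat) (s : Int), 0 < s → s * s ≤ n →
    n < (s + fuel) * (s + fuel) →
    0 < isqrtLoop n fuel s ∧ (isqrtLoop n fuel s) * (isqrtLoop n fuel s) ≤ n ∧
      n < (isqrtLoop n fuel s + 1) * (isqrtLoop n fuel s + 1) := by
  intro fuel
  induction fuel with
  | zero =>
    intro s hs h1 h2
    push_cast at h2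
    simp only [add_zero] at h2
    linarith
  | succ f ih =>
    intro s hs h1 h2
    rw [isqrtLoop]
    split
    · apply ih (s + 1) (by omega) (by assumption)
      have e : (s + 1 + (f : Int)) = s + ((f : Int) + 1) := by ring
      rw [e]
      push_cast at h2 ⊢
      linarith [h2]
    · exact ⟨hs, h1, by linarith [not_le.mp (by assumption : ¬(s + 1) * (s + 1) ≤ n)]⟩

theorem mkSquares_eq (n r : Int) (hr : 0 < r) (hr2 : r * r ≤ n) (hr3 : n < (r + 1) * (r + 1)) :
    ∀ (fuel : Nat) (i : Int), 0 < i → n < (i + fuel) * (i + fuel) →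
      mkSquares n fuel i = ascRun i r := by
  intro fuel
  induction fuel with
  | zero =>
    intro i hi h2
    push_cast at h2
    simp only [add_zero] at h2
    rw [mkSquares, ascRun_nil]
    by_contra hcon
    push_neg at hcon
    have : i * i ≤ r * r := mul_le_mul (by omega) (by omega) (by omega) (by omega)
    linarith
  | succ f ih =>
    intro i hi h2
    rw [mkSquares]
    by_cases hsq : i ^ 2 ≤ n
    · rw [if_pos hsq]
      have hin : i * i ≤ n := by nlinarith
      have hir : i ≤ r := by
        by_contra hcon
        push_neg at hcon
        have : (r + 1) * (r + 1) ≤ i * i := mul_le_mul (by omega) (by omega) (by omega) (by omega)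
        linarith
      rw [ascRun_cons _ _ hir]
      congr 1
      apply ih (i + 1) (by omega)
      have e : (i + 1 + (f : Int)) = i + ((f : Int) + 1) := by ring
      rw [e]
      push_cast at h2 ⊢
      linarith
    · rw [if_neg hsq]
      push_neg at hsq
      have hni : n < i * i := by nlinarith
      rw [ascRun_nil]
      by_contra hcon
      push_neg at hcon
      have : i * i ≤ r * r := mul_le_mul (by omega) (by omega) (by omega) (by omega)
      linarith

theorem goFa_low (r q : Int) (hq : q ≤ r) :
    ∀ (k : Nat) (fa : Int) (temp : List Int) (V : List Bool),
      (q - fa).toNat ≤ k → 1 ≤ fa → fa ≤ q → goFa q (ascRun fa r) temp V = none := by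
  intro k
  induction k with
  | zero =>
    intro fa temp V hk h1 h2
    have : fa = q := by omega
    subst this
    rw [ascRun_cons _ _ (by omega), goFa, if_pos rfl]
  | succ k ih =>
    intro fa temp V hk h1 h2
    by_cases hfa : q = fa
    · rw [ascRun_cons _ _ (by omega), goFa, if_pos hfa]
    · rw [ascRun_cons _ _ (by omega), goFa, if_neg hfa, if_neg (by omega)]
      split
      · exact ih (fa + 1) temp V (by omega) (by omega) (by omega)
      · exact ih (fa + 1) _ _ (by omega) (by omega) (by omega)

theorem goFa_first (n r : Int) (hr : 1 ≤ r) (hrn : r < n) :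
    ∀ (k : Nat) (fa : Int) (temp : List Int) (V : List Bool),
      (r - fa).toNat ≤ k → 1 ≤ fa → fa ≤ r → VisInv n (n - fa + 1) V →
      ∃ V', goFa n (ascRun fa r) temp V = some (temp ++ descRun (n - fa) (n - r), V') ∧
        VisInv n (n - r) V' := by
  intro k
  induction k with
  | zero =>
    intro fa temp V hk h1 h2 hV
    have hfr : fa = r := by omega
    rw [hfr] at hV ⊢
    rw [ascRun_cons _ _ (by omega), goFa, if_neg (by omega), if_neg (by omega)]
    rw [visinv_read n _ V hV (n - r) (by omega)]
    rw [if_neg (by simp only [decide_eq_true_eq]; omega)]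
    rw [ascRun_nil _ _ (by omega), goFa]
    refine ⟨pySetTrue V (n - r).toNat, ?_, ?_⟩
    · rw [descRun_cons _ _ (by omega), descRun_nil _ _ (by omega)]
    · have := visinv_mark n (n - r + 1) V hV (by omega) (by omega)
      simpa using this
  | succ k ih =>
    intro fa temp V hk h1 h2 hV
    by_cases hfr : fa = r
    · rw [hfr] at hV ⊢
      rw [ascRun_cons _ _ (by omega), goFa, if_neg (by omega), if_neg (by omega)]
      rw [visinv_read n _ V hV (n - r) (by omega)]
      rw [if_neg (by simp only [decide_eq_true_eq]; omega)]
      rw [ascRun_nil _ _ (by omega), goFa]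
      refine ⟨pySetTrue V (n - r).toNat, ?_, ?_⟩
      · rw [descRun_cons _ _ (by omega), descRun_nil _ _ (by omega)]
      · have := visinv_mark n (n - r + 1) V hV (by omega) (by omega)
        simpa using this
    · -- fa < r : the value n - fa is unvisited (marked are n-fa+1 .. n-1), append and mark
      rw [ascRun_cons _ _ (by omega), goFa, if_neg (by omega), if_neg (by omega)]
      rw [visinv_read n _ V hV (n - fa) (by omega)]
      rw [if_neg (by simp only [decide_eq_true_eq]; omega)]
      have hV' := visinv_mark n (n - fa + 1) V hV (by omega) (by omega)
      simp only [show n - fa + 1 - 1 = n - fa from by omega] at hV'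
      have hV'' : VisInv n (n - (fa + 1) + 1) (pySetTrue V (n - fa).toNat) := by
        simpa only [show n - (fa + 1) + 1 = n - fa from by omega] using hV'
      obtain ⟨V', hgo, hinv⟩ := ih (fa + 1) (temp ++ [n - fa]) _ (by omega) (by omega) (by omega) hV''
      refine ⟨V', ?_, hinv⟩
      rw [hgo, List.append_assoc]
      congr 2
      rw [descRun_cons (n - fa) (n - r) (by omega)]
      simp [show n - fa - 1 = n - (fa + 1) from by omega]

theorem goFa_step (n r q : Int) (hr : 1 ≤ r) (hq : r < q) (hqn : q ≤ n - 1) :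
    ∀ (k : Nat) (fa : Int) (temp : List Int) (V : List Bool),
      (r - fa).toNat ≤ k → 1 ≤ fa → fa ≤ r → VisInv n (q - r + 1) V →
      ∃ V', goFa q (ascRun fa r) temp V = some (temp ++ [q - r], V') ∧
        VisInv n (q - r) V' := by
  intro k
  induction k with
  | zero =>
    intro fa temp V hk h1 h2 hV
    have hfr : fa = r := by omega
    rw [hfr]
    rw [ascRun_cons _ _ (by omega), goFa, if_neg (by omega), if_neg (by omega)]
    rw [visinv_read n _ V hV (q - r) (by omega)]
    rw [if_neg (by simp only [decide_eq_true_eq]; omega)]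
    rw [ascRun_nil _ _ (by omega), goFa]
    refine ⟨_, rfl, ?_⟩
    have := visinv_mark n (q - r + 1) V hV (by omega) (by omega)
    simpa using this
  | succ k ih =>
    intro fa temp V hk h1 h2 hV
    by_cases hfr : fa = r
    · rw [hfr]
      rw [ascRun_cons _ _ (by omega), goFa, if_neg (by omega), if_neg (by omega)]
      rw [visinv_read n _ V hV (q - r) (by omega)]
      rw [if_neg (by simp only [decide_eq_true_eq]; omega)]
      rw [ascRun_nil _ _ (by omega), goFa]
      refine ⟨_, rfl, ?_⟩
      have := visinv_mark n (q - r + 1) V hV (by omega) (by omega)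
      simpa using this
    · -- fa < r : the value q - fa is already visited, continue
      rw [ascRun_cons _ _ (by omega), goFa, if_neg (by omega), if_neg (by omega)]
      rw [visinv_read n _ V hV (q - fa) (by omega)]
      rw [if_pos (by simp only [decide_eq_true_eq]; omega)]
      exact ih (fa + 1) temp V (by omega) (by omega) (by omega) hV

theorem goQ_high (n r t : Int) (hr : 1 ≤ r) (ht : r < t) :
    ∀ (k : Nat) (a : Int) (temp : List Int) (V : List Bool),
      (a - t).toNat ≤ k → t ≤ a → a ≤ n - 1 → VisInv n (a - r + 1) V →
      ∃ V', goQ (ascRun 1 r) (descRun a t) temp V =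
          some (temp ++ descRun (a - r) (t - r), V') ∧ VisInv n (t - r) V' := by
  intro k
  induction k with
  | zero =>
    intro a temp V hk hta han hV
    have hat : a = t := by omega
    rw [hat] at hV ⊢
    rw [descRun_cons _ _ le_rfl, descRun_nil _ _ (by omega), goQ]
    obtain ⟨V', hgo, hinv⟩ := goFa_step n r t hr ht (by omega) (r - 1).toNat 1 temp V
      (by omega) le_rfl hr (by simpa using hV)
    rw [hgo]
    refine ⟨V', ?_, hinv⟩
    show goQ (ascRun 1 r) [] (temp ++ [t - r]) V' = _
    rw [goQ, descRun_cons _ _ le_rfl, descRun_nil _ _ (by omega)]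
  | succ k ih =>
    intro a temp V hk hta han hV
    by_cases hat : a = t
    · rw [hat] at hV ⊢
      rw [descRun_cons _ _ le_rfl, descRun_nil _ _ (by omega), goQ]
      obtain ⟨V', hgo, hinv⟩ := goFa_step n r t hr ht (by omega) (r - 1).toNat 1 temp V
        (by omega) le_rfl hr (by simpa using hV)
      rw [hgo]
      refine ⟨V', ?_, hinv⟩
      show goQ (ascRun 1 r) [] (temp ++ [t - r]) V' = _
      rw [goQ, descRun_cons _ _ le_rfl, descRun_nil _ _ (by omega)]
    · rw [descRun_cons _ _ (by omega), goQ]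
      obtain ⟨V', hgo, hinv⟩ := goFa_step n r a hr (by omega) (by omega) (r - 1).toNat 1 temp V
        (by omega) le_rfl hr (by simpa using hV)
      rw [hgo]
      obtain ⟨V'', hgo2, hinv2⟩ := ih (a - 1) (temp ++ [a - r]) V' (by omega) (by omega)
        (by omega) (by simpa [show a - 1 - r + 1 = a - r from by omega] using hinv)
      refine ⟨V'', ?_, hinv2⟩
      show goQ (ascRun 1 r) (descRun (a - 1) t) (temp ++ [a - r]) V' = _
      rw [hgo2, List.append_assoc]
      congr 2
      rw [descRun_cons (a - r) (t - r) (by omega)]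
      simp [show a - r - 1 = a - 1 - r from by omega]

theorem goQ_low (n r t : Int) (hr : 1 ≤ r) (ht1 : 1 ≤ t) (ht : t ≤ r) :
    ∀ (k : Nat) (a : Int) (temp : List Int) (V : List Bool),
      (a - t).toNat ≤ k → t ≤ a → a ≤ n - 1 → VisInv n (a - r + 1) V →
      goQ (ascRun 1 r) (descRun a t) temp V = none := by
  intro k
  induction k with
  | zero =>
    intro a temp V hk hta han hV
    have hat : a = t := by omega
    rw [hat]
    rw [descRun_cons _ _ le_rfl, descRun_nil _ _ (by omega), goQ]
    rw [goFa_low r t ht (t - 1).toNat 1 temp V (by omega) le_rfl ht1]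
  | succ k ih =>
    intro a temp V hk hta han hV
    rw [descRun_cons _ _ (by omega), goQ]
    by_cases har : a ≤ r
    · rw [goFa_low r a har (a - 1).toNat 1 temp V (by omega) le_rfl (by omega)]
    · obtain ⟨V', hgo, hinv⟩ := goFa_step n r a hr (by omega) (by omega) (r - 1).toNat 1 temp V
        (by omega) le_rfl hr (by simpa using hV)
      rw [hgo]
      show goQ (ascRun 1 r) (descRun (a - 1) t) (temp ++ [a - r]) V' = _
      exact ih (a - 1) (temp ++ [a - r]) V' (by omega) (by omega) (by omega)
        (by simpa [show a - 1 - r + 1 = a - r from by omega] using hinv)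

theorem ceil_low (r t : Int) (hr : 0 < r) (h1 : 1 ≤ t) (h2 : t ≤ r) :
    -(PySem.Int.floordiv (-t) r) = 1 := by
  rw [PySem.Int.neg_floordiv_neg_eq_iff_of_pos hr]
  constructor <;> nlinarith

theorem ceil_step (r t : Int) (hr : 0 < r) (h : r < t) :
    -(PySem.Int.floordiv (-t) r) = 1 + -(PySem.Int.floordiv (-(t - r)) r) := by
  have hq := (PySem.Int.neg_floordiv_neg_eq_iff_of_pos (a := t - r) hr).mp rfl
  rw [PySem.Int.neg_floordiv_neg_eq_iff_of_pos hr]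
  obtain ⟨hq1, hq2⟩ := hq
  constructor <;> nlinarith

theorem bfs_main (n r : Int) (hr : 1 ≤ r) :
    ∀ (fuel : Nat) (t : Int) (V : List Bool) (k : Int), 1 ≤ t → t + r ≤ n →
      t.toNat < fuel → VisInv n t V →
      bfs (ascRun 1 r) fuel k (descRun (t + r - 1) t) V =
        k + -(PySem.Int.floordiv (-t) r) := by
  intro fuel
  induction fuel with
  | zero => intro t V k h1 h2 h3 hV; omega
  | succ f ih =>
    intro t V k h1 h2 h3 hV
    rw [descRun_cons _ _ (by omega), bfs]
    by_cases htr : t ≤ r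
    · have hnone := goQ_low n r t hr h1 htr (t + r - 1 - t).toNat (t + r - 1) [] V le_rfl
        (by omega) (by omega) (by simpa [show t + r - 1 - r + 1 = t from by omega] using hV)
      rw [descRun_cons _ _ (by omega)] at hnone
      rw [hnone, ceil_low r t (by omega) h1 htr]
    · obtain ⟨V', hgo, hinv⟩ := goQ_high n r t hr (by omega) (t + r - 1 - t).toNat (t + r - 1)
        [] V le_rfl (by omega) (by omega)
        (by simpa [show t + r - 1 - r + 1 = t from by omega] using hV)
      rw [descRun_cons _ _ (by omega)] at hgo
      rw [hgo]
      show bfs (ascRun 1 r) f (k + 1) ([] ++ descRun (t + r - 1 - r) (t - r)) V' = _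
      have e1 : t + r - 1 - r = (t - r) + r - 1 := by ring
      rw [List.nil_append, e1]
      rw [ih (t - r) V' (k + 1) (by omega) (by omega) (by omega) hinv]
      rw [ceil_step r t (by omega) (by omega)]
      ring

theorem get_eq (n : Int) (hn : 1 ≤ n) : get n = get_alt n := by
  by_cases h1 : n = 1
  · subst h1; decide
  · -- n ≥ 2
    have hn2 : 2 ≤ n := by omega
    have hfb : n < (1 + ((n.toNat + 1 : Nat) : Int)) * (1 + ((n.toNat + 1 : Nat) : Int)) := by
      push_cast
      nlinarith [Int.toNat_of_nonneg (by omega : (0:Int) ≤ n)]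
    obtain ⟨hr0, hr2, hr3⟩ := isqrt_spec n (n.toNat + 1) 1 one_pos (by omega) hfb
    set r := isqrtLoop n (n.toNat + 1) 1 with hrdef
    have hrn : r < n := by nlinarith
    have hsq : mkSquares n (n.toNat + 1) 1 = ascRun 1 r :=
      mkSquares_eq n r hr0 hr2 hr3 (n.toNat + 1) 1 one_pos hfb
    have hV0 := visinv_init n (by omega)
    -- first BFS level: queue [n] produces the run n-1 .. n-r
    obtain ⟨V1, hgo1, hinv1⟩ := goFa_first n r (by omega) hrn (r - 1).toNat 1 [] _
      (by omega) le_rfl (by omega) (by simpa [show n - 1 + 1 = n from by omega] using hV0)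
    show bfs (mkSquares n (n.toNat + 1) 1) (n.toNat + 2) 0 [n]
        (List.replicate (n + 1).toNat false) = get_alt n
    rw [hsq, show (n.toNat + 2) = (n.toNat + 1) + 1 from rfl, bfs]
    rw [goQ, hgo1]
    show bfs (ascRun 1 r) (n.toNat + 1) (0 + 1) ([] ++ descRun (n - 1) (n - r)) V1 = get_alt n
    rw [List.nil_append, show n - 1 = (n - r) + r - 1 from by ring]
    rw [bfs_main n r (by omega) (n.toNat + 1) (n - r) V1 (0 + 1) (by omega) (by omega)
      (by omega) hinv1]
    have hstep := ceil_step r n (by omega) hrn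
    rw [get_alt, if_neg (by omega)]
    rw [← hrdef, hstep]
    ring

-- ===== VERDICT (by name: the statement is the Claim_ definition above) =====
theorem get_spec : Claim_unchanged_get := by
  intro n _ hpre hd
  have h1 : 1 ≤ n := by
    unfold Pre_get at hpre; unfold D_get at hd; omega
  exact get_eq n h1

theorem get_changed : Claim_changed_get := by unfold Claim_changed_get; decide

theorem get_tight : Claim_exact_get := by
  intro n _ _ hd
  unfold D_get at hd; subst hd; decide
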